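-- pv_equiv track=rewrite | github.com/legal-ai-2026/RangerAI | src/ingest/providers.py | _heuristic_task_code
-- ===== SOURCE A (Python) =====
-- def _heuristic_task_code(sentence: str) -> str:
--     lowered = sentence.lower()
--     if any(
--         term in lowered
--         for term in ("phase line", "sitrep", "frago", "movement", "checkpoint report")
--     ):
--         return "MV-2"
--     if any(
--         term in lowered
--         for term in (
--             "patrol-base",
--             "patrol base",
--             "priorities of work",
--             "security",
--             "asleep",
--         )
--     ):
--         return "PB-7"
--     if any(term in lowered for term in ("ambush", "fire control", "initiation")):
--         return "AM-4"
--     if any(term in lowered for term in ("delegat", "leader", "decision", "hesitated")):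
--         return "leadership"
--     return "UNMAPPED"
-- ===== SOURCE B (Python) =====
-- CODES = ("MV-2", "PB-7", "AM-4", "leadership", "UNMAPPED")
--
-- TERMS = [
--     ("phase line", 0), ("sitrep", 0), ("frago", 0), ("movement", 0),
--     ("checkpoint report", 0),
--     ("patrol-base", 1), ("patrol base", 1), ("priorities of work", 1),
--     ("security", 1), ("asleep", 1),
--     ("ambush", 2), ("fire control", 2), ("initiation", 2),
--     ("delegat", 3), ("leader", 3), ("decision", 3), ("hesitated", 3),
-- ]
--
--
-- def _heuristic_task_code(sentence: str) -> str:
--     lowered = sentence.lower()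
--     best = 4
--     for term, pri in TERMS:
--         if pri < best and term in lowered:
--             best = pri
--     return CODES[best]
-- ===== Notes on version B (the rewrite author's own statement) =====
-- stated objective: alternative
-- what changed: Instead of A's four sequential if/any branches with first-match early return, B makes one flat pass over all 17 (term, priority) pairs computing the minimum priority of any matching term with an accumulator, then indexes a code table by that minimum.
import Mathlib
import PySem

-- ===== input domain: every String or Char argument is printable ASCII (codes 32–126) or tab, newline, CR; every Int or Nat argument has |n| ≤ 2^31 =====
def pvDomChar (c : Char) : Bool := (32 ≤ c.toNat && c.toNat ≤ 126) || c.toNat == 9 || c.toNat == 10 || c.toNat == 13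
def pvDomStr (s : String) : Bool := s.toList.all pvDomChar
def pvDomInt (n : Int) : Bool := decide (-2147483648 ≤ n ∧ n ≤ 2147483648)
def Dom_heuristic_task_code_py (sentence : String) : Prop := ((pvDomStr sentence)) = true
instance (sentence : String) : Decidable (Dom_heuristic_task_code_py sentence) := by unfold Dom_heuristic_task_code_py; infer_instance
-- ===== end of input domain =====

-- B replaces A's first-match if/any cascade by one flat pass over all (term, priority)
-- pairs that computes the minimum priority of any matching term (alternative; same behaviour).

-- ===== PORT A =====
def heuristic_task_code_py (sentence : String) : String :=
  let lowered := PySem.Str.lower sentence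
  if ["phase line", "sitrep", "frago", "movement", "checkpoint report"].any
      (fun term => PySem.Str.isIn term lowered) then "MV-2"
  else if ["patrol-base", "patrol base", "priorities of work", "security", "asleep"].any
      (fun term => PySem.Str.isIn term lowered) then "PB-7"
  else if ["ambush", "fire control", "initiation"].any
      (fun term => PySem.Str.isIn term lowered) then "AM-4"
  else if ["delegat", "leader", "decision", "hesitated"].any
      (fun term => PySem.Str.isIn term lowered) then "leadership"
  else "UNMAPPED"

-- ===== PORT B =====
def pvCodes : List String := ["MV-2", "PB-7", "AM-4", "leadership", "UNMAPPED"]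

def pvTerms : List (String × Nat) :=
  [ ("phase line", 0), ("sitrep", 0), ("frago", 0), ("movement", 0),
    ("checkpoint report", 0),
    ("patrol-base", 1), ("patrol base", 1), ("priorities of work", 1),
    ("security", 1), ("asleep", 1),
    ("ambush", 2), ("fire control", 2), ("initiation", 2),
    ("delegat", 3), ("leader", 3), ("decision", 3), ("hesitated", 3) ]

-- one loop step: keep the smaller priority when the term matches
def pvStep (lowered : String) (best : Nat) (tp : String × Nat) : Nat :=
  if tp.2 < best && PySem.Str.isIn tp.1 lowered then tp.2 else best

def heuristic_task_code_py_alt (sentence : String) : String :=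
  let lowered := PySem.Str.lower sentence
  let best := pvTerms.foldl (pvStep lowered) 4
  pvCodes.getD best "UNMAPPED"

-- ===== PRECONDITION & SPEC =====
def Spec_heuristic_task_code_py (sentence : String) (out : String) : Prop := out = heuristic_task_code_py_alt sentence
instance (sentence : String) (out : String) : Decidable (Spec_heuristic_task_code_py sentence out) := by unfold Spec_heuristic_task_code_py; infer_instance

-- ===== CLAIM (what is proved, stated in full; the proofs are below) =====
def Claim_equal_heuristic_task_code_py : Prop := ∀ (sentence : String), Dom_heuristic_task_code_py sentence → Spec_heuristic_task_code_py sentence (heuristic_task_code_py sentence)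

-- ===== LEMMAS AND PROOFS =====

-- folding B's step over one constant-priority group of terms keeps the smaller of
-- the incoming best and (p, if some term of the group matches); stated for an
-- arbitrary match predicate m
theorem pv_grp (m : String → Bool) (ts : List String) (p b : Nat) :
    (ts.map (fun t => (t, p))).foldl
        (fun best tp => if tp.2 < best && m tp.1 then tp.2 else best) b
      = if p < b && ts.any m then p else b := by
  induction ts generalizing b with
  | nil => simp
  | cons t ts ih =>
    simp only [List.map_cons, List.foldl_cons, List.any_cons]
    rw [ih]
    rcases (m t).eq_false_or_eq_true with hm | hm <;>
      by_cases hb : p < b <;> simp [hm, hb]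

-- B's step function, eta-expanded to expose the match predicate
theorem pvStep_eq (lowered : String) :
    pvStep lowered
      = fun best tp => if tp.2 < best && (fun t => PySem.Str.isIn t lowered) tp.1 then tp.2 else best := rfl

-- the two programs agree as functions of the four group-match booleans
theorem pv_key : ∀ (g0 g1 g2 g3 : Bool),
    (if g0 then "MV-2" else if g1 then "PB-7" else if g2 then "AM-4"
     else if g3 then "leadership" else "UNMAPPED")
    = pvCodes.getD
        (if 3 < (if 2 < (if 1 < (if 0 < 4 && g0 then 0 else 4) && g1 then 1
                          else (if 0 < 4 && g0 then 0 else 4)) && g2 then 2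
                  else (if 1 < (if 0 < 4 && g0 then 0 else 4) && g1 then 1
                          else (if 0 < 4 && g0 then 0 else 4))) && g3 then 3
           else (if 2 < (if 1 < (if 0 < 4 && g0 then 0 else 4) && g1 then 1
                          else (if 0 < 4 && g0 then 0 else 4)) && g2 then 2
                  else (if 1 < (if 0 < 4 && g0 then 0 else 4) && g1 then 1
                          else (if 0 < 4 && g0 then 0 else 4)))) "UNMAPPED" := by
  intro g0 g1 g2 g3
  cases g0 <;> cases g1 <;> cases g2 <;> cases g3 <;> rfl

-- pvTerms is the concatenation of the four constant-priority groups
theorem pv_terms_split :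
    pvTerms = (["phase line", "sitrep", "frago", "movement", "checkpoint report"].map (fun t => (t, 0)))
      ++ (["patrol-base", "patrol base", "priorities of work", "security", "asleep"].map (fun t => (t, 1)))
      ++ (["ambush", "fire control", "initiation"].map (fun t => (t, 2)))
      ++ (["delegat", "leader", "decision", "hesitated"].map (fun t => (t, 3))) := rfl

-- ===== VERDICT (by name: the statement is the Claim_ definition above) =====
theorem heuristic_task_code_py_spec : Claim_equal_heuristic_task_code_py := by
  intro sentence _
  unfold Spec_heuristic_task_code_py heuristic_task_code_py heuristic_task_code_py_alt
  simp only []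
  generalize PySem.Str.lower sentence = lowered
  rw [pv_terms_split]
  simp only [pvStep_eq, List.foldl_append]
  simp only [pv_grp (fun t => PySem.Str.isIn t lowered)]
  exact pv_key (["phase line", "sitrep", "frago", "movement", "checkpoint report"].any
      (fun t => PySem.Str.isIn t lowered))
    (["patrol-base", "patrol base", "priorities of work", "security", "asleep"].any
      (fun t => PySem.Str.isIn t lowered))
    (["ambush", "fire control", "initiation"].any (fun t => PySem.Str.isIn t lowered))
    (["delegat", "leader", "decision", "hesitated"].any (fun t => PySem.Str.isIn t lowered))
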